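-- pv_equiv track=rewrite | github.com/QasimK/Project-Euler-Python | src/problems/p_1_49/p33.py | get_numerators
-- ===== SOURCE A (Python) =====
-- def get_numerators(c, d):
--     """For ab/cd, Return a, b such that ab < cd"""
--     a = c
--     b = d-1
--     while b >= 0:
--         yield a, b
--         b -= 1
--
--     a = c-1
--     while a >= 1:
--         b = 9
--         while b >= 0:
--             yield a, b
--             b -= 1
--         a -= 1
-- ===== SOURCE B (Python) =====
-- def get_numerators(c, d):
--     """For ab/cd, Return a, b such that ab < cd"""
--     base = 10 * c
--     for n in range(base + d - 1, base - 1, -1):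
--         yield c, n - base
--     for n in range(base - 1, 9, -1):
--         yield n // 10, n % 10
-- ===== Notes on version B (the rewrite author's own statement) =====
-- stated objective: simpler
-- what changed: Replaces the three hand-maintained while-loops over digit pairs with two flat numeric range scans over the numerator value n, recovering the digit pair by divmod (n//10, n%10).
import Mathlib
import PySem

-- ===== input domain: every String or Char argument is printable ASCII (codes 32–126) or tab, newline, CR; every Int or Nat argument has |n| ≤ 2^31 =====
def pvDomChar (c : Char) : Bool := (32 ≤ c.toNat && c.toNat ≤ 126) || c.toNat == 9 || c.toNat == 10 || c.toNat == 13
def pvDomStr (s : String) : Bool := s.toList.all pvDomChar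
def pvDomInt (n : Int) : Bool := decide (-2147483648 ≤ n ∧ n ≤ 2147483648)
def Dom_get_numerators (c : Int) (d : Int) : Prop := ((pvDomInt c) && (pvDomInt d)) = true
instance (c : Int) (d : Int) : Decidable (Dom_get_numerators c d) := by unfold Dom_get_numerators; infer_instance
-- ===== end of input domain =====

-- B replaces A's three hand-maintained while-loops with two flat numeric range scans plus divmod (objective: simpler).

-- ===== PORT A =====
-- inner 'while b >= 0: yield a, b; b -= 1'
def pvLoopB (a : Int) (b : Int) : List (Int × Int) :=
  if h : b ≥ 0 then (a, b) :: pvLoopB a (b - 1) else []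
termination_by (b + 1).toNat
decreasing_by omega

-- outer 'while a >= 1: <inner with b = 9>; a -= 1'
def pvLoopA (a : Int) : List (Int × Int) :=
  if _h : a ≥ 1 then pvLoopB a 9 ++ pvLoopA (a - 1) else []
termination_by a.toNat
decreasing_by omega

def get_numerators (c : Int) (d : Int) : List (Int × Int) :=
  pvLoopB c (d - 1) ++ pvLoopA (c - 1)

-- ===== PORT B =====
def get_numerators_alt (c : Int) (d : Int) : List (Int × Int) :=
  let base := 10 * c
  (PySem.List.pyRange (base + d - 1) (base - 1) (-1)).map (fun n => (c, n - base)) ++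
  (PySem.List.pyRange (base - 1) 9 (-1)).map (fun n => (PySem.Int.floordiv n 10, PySem.Int.mod n 10))

-- ===== PRECONDITION & SPEC =====
def Spec_get_numerators (c : Int) (d : Int) (out : List (Int × Int)) : Prop := out = get_numerators_alt c d
instance (c : Int) (d : Int) (out : List (Int × Int)) : Decidable (Spec_get_numerators c d out) := by unfold Spec_get_numerators; infer_instance

-- ===== CLAIM (what is proved, stated in full; the proofs are below) =====
def Claim_equal_get_numerators : Prop := ∀ (c : Int) (d : Int), Dom_get_numerators c d → Spec_get_numerators c d (get_numerators c d)

-- ===== LEMMAS AND PROOFS =====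

-- A's inner while-loop lists b, b-1, …, 0 paired with a
theorem pvLoopB_eq (a : Int) (b : Int) :
    pvLoopB a b = (PySem.List.pyRange b (-1) (-1)).map (fun m => (a, m)) := by
  by_cases h : b ≥ 0
  · rw [PySem.List.pyRange_neg_one_cons (show (-1:Int) < b by omega), pvLoopB]
    rw [dif_pos h, pvLoopB_eq a (b - 1)]
    simp
  · rw [pvLoopB, dif_neg h, PySem.List.pyRange_neg_one_eq_nil (by omega)]
    simp
termination_by (b + 1).toNat
decreasing_by omega

-- splitting a countdown range at an intermediate point
theorem pyRange_neg_one_append (a m b : Int) (h1 : b ≤ m) (h2 : m ≤ a) :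
    PySem.List.pyRange a b (-1) =
      PySem.List.pyRange a m (-1) ++ PySem.List.pyRange m b (-1) := by
  rw [PySem.List.pyRange_neg_one_eq_reverse, PySem.List.pyRange_neg_one_eq_reverse,
      PySem.List.pyRange_neg_one_eq_reverse,
      PySem.List.pyRange_one_append (b + 1) (m + 1) (a + 1) (by omega) (by omega)]
  simp

-- A's outer loop equals a flat countdown scan from 10*a-1 to 10 with divmod
theorem pvLoopA_eq (a : Int) :
    pvLoopA a = (PySem.List.pyRange (10 * a + 9) 9 (-1)).map
      (fun n => (PySem.Int.floordiv n 10, PySem.Int.mod n 10)) := by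
  rw [pvLoopA]
  by_cases h : a ≥ 1
  · rw [dif_pos h, pvLoopA_eq (a - 1),
      pyRange_neg_one_append (10 * a + 9) (10 * (a - 1) + 9) 9 (by omega) (by omega),
      List.map_append, pvLoopB_eq]
    congr 1
    rw [PySem.List.pyRange_neg_one, PySem.List.pyRange_neg_one, List.map_map, List.map_map]
    have h10 : ((10 * a + 9) - (10 * (a - 1) + 9)).toNat = (9 - (-1) : Int).toNat := by omega
    rw [h10]
    refine List.map_congr_left ?_
    intro k hk
    have hk' : k < 10 := by simpa using List.mem_range.mp hk
    simp only [Function.comp]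
    rw [PySem.Int.floordiv_eq_ediv_of_pos (by norm_num), PySem.Int.mod_eq_emod_of_pos (by norm_num)]
    simp only [Prod.mk.injEq]
    exact ⟨by omega, by omega⟩
  · rw [dif_neg h, PySem.List.pyRange_neg_one_eq_nil (by omega)]
    simp
termination_by a.toNat
decreasing_by omega

-- ===== VERDICT (by name: the statement is the Claim_ definition above) =====
theorem get_numerators_spec : Claim_equal_get_numerators := by
  intro c d _
  unfold Spec_get_numerators get_numerators get_numerators_alt
  rw [pvLoopB_eq, pvLoopA_eq]
  congr 1
  · rw [PySem.List.pyRange_neg_one, PySem.List.pyRange_neg_one, List.map_map, List.map_map]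
    have h1 : ((10 * c + d - 1) - (10 * c - 1)).toNat = ((d - 1) - (-1) : Int).toNat := by omega
    rw [h1]
    refine (List.map_congr_left ?_).symm
    intro k _
    simp only [Function.comp, Prod.mk.injEq]
    exact ⟨trivial, by omega⟩
  · have e : 10 * (c - 1) + 9 = 10 * c - 1 := by ring
    rw [e]
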